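-- pv_equiv track=rewrite | github.com/collinsakenga/codewars_solutions | 6 kyu/6 kyu_Sorting on planet Twisted-3-7.py | convert
-- ===== SOURCE A (Python) =====
-- def convert(n):
--     if "3" not in str(n) and "7" not in str(n):
--         return n
--     neg_flag = True if n < 0 else False
--     n = abs(n)
--     total = 0
--     for i in str(n):
--         if i == "3":
--             total = total*10+7
--         elif i == "7":
--             total = total*10+3
--         else:
--             total = total*10+int(i)
--     return -total if neg_flag else total
-- ===== SOURCE B (Python) =====
-- def convert(n):
--     # Pure-arithmetic recursion on divmod; no string conversion at all.
--     if n < 0: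
--         return -convert(-n)
--     if n < 10:
--         return 7 if n == 3 else 3 if n == 7 else n
--     q, r = divmod(n, 10)
--     return convert(q) * 10 + (7 if r == 3 else 3 if r == 7 else r)
-- ===== Notes on version B (the rewrite author's own statement) =====
-- stated objective: alternative
-- what changed: B replaces A's str(n) conversion, substring guard and per-character accumulator loop by a pure arithmetic divmod recursion that swaps the digits 3 and 7 with no string handling at all.
import Mathlib
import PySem

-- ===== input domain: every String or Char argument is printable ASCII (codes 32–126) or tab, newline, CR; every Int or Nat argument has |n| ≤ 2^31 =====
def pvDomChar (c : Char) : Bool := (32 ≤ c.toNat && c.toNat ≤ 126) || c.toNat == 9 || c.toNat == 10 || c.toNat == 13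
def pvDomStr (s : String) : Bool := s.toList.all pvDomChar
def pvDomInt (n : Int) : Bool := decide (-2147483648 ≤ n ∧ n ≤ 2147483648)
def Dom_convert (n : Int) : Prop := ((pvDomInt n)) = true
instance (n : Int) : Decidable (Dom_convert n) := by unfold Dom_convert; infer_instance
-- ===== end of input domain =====

-- B replaces A's string conversion + per-character accumulator loop by a pure
-- arithmetic divmod recursion swapping the digits 3 and 7 (objective: alternative).


-- ===== PORT A =====
-- loop body: total = total*10+7 / total*10+3 / total*10+int(i)
-- int(i) is ported as PySem.Int.ofChars? [c]; in the loop c is always a decimal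
-- digit character of str(n), so the parse always succeeds and `.getD 0` is exact.
def stepA (total : Int) (c : Char) : Int :=
  if c == '3' then total * 10 + 7
  else if c == '7' then total * 10 + 3
  else total * 10 + (PySem.Int.ofChars? [c]).getD 0

def convert (n : Int) : Int :=
  if ¬ PySem.Chars.isIn ['3'] (PySem.Int.toChars n)
      ∧ ¬ PySem.Chars.isIn ['7'] (PySem.Int.toChars n) then n
  else
    let negFlag : Bool := n < 0
    let m : Int := |n|
    let total : Int := (PySem.Int.toChars m).foldl stepA 0
    if negFlag then -total else total

-- ===== PORT B =====
-- Source B's recursion; after the n < 0 branch n is nonnegative, so the recursion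
-- runs on a Nat (Python's divmod on nonnegative ints = Nat div/mod exactly).
def convertPos (m : Nat) : Int :=
  if h : m < 10 then (if m = 3 then 7 else if m = 7 then 3 else (m : Int))
  else
    convertPos (m / 10) * 10 +
      (if m % 10 = 3 then 7 else if m % 10 = 7 then 3 else ((m % 10 : Nat) : Int))
decreasing_by exact Nat.div_lt_self (by omega) (by omega)

def convert_alt (n : Int) : Int :=
  if n < 0 then -(convertPos (-n).toNat) else convertPos n.toNat

-- ===== PRECONDITION & SPEC =====
def Spec_convert (n : Int) (out : Int) : Prop := out = convert_alt n
instance (n : Int) (out : Int) : Decidable (Spec_convert n out) := by unfold Spec_convert; infer_instance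

-- ===== CLAIM (what is proved, stated in full; the proofs are below) =====
def Claim_equal_convert : Prop := ∀ (n : Int), Dom_convert n → Spec_convert n (convert n)

-- ===== LEMMAS AND PROOFS =====

-- fuel invariance of Nat.toDigitsCore (base 10)
theorem toDigitsCore_shift (n : Nat) : ∀ (f : Nat) (l : List Char), n < f →
    Nat.toDigitsCore 10 f n l = Nat.toDigitsCore 10 (n + 1) n [] ++ l := by
  induction n using Nat.strong_induction_on with
  | _ n ih =>
    intro f l hf
    match f with
    | f' + 1 =>
      by_cases h : n / 10 = 0
      · simp [Nat.toDigitsCore, h]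
      · have hn10 : 10 ≤ n := by
          by_contra hc
          exact h (Nat.div_eq_of_lt (by omega))
        have hlt : n / 10 < n := Nat.div_lt_self (by omega) (by omega)
        have hf' : n / 10 < f' := by omega
        simp only [Nat.toDigitsCore, h, if_false]
        rw [ih (n / 10) hlt f' _ hf', ih (n / 10) hlt n _ (by omega)]
        simp

theorem toDigits_lt (m : Nat) (h : m < 10) :
    Nat.toDigits 10 m = [Nat.digitChar m] := by
  simp [Nat.toDigits, Nat.toDigitsCore, Nat.div_eq_of_lt h, Nat.mod_eq_of_lt h]

theorem toDigits_ge (m : Nat) (h : 10 ≤ m) :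
    Nat.toDigits 10 m = Nat.toDigits 10 (m / 10) ++ [Nat.digitChar (m % 10)] := by
  have h10 : ¬ m / 10 = 0 := by
    intro hc; have := Nat.div_eq_of_lt (a := m) (b := 10); omega
  have hlt : m / 10 < m := Nat.div_lt_self (by omega) (by omega)
  show Nat.toDigitsCore 10 (m + 1) m [] = _
  simp only [Nat.toDigitsCore, h10, if_false]
  rw [toDigitsCore_shift (m / 10) m _ (by omega)]
  rfl

theorem stepA_digitChar (t : Int) (r : Nat) (h : r < 10) :
    stepA t (Nat.digitChar r)
      = t * 10 + (if r = 3 then 7 else if r = 7 then 3 else (r : Int)) := by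
  interval_cases r <;> simp [stepA, Nat.digitChar] <;> decide

theorem convertPos_lt (m : Nat) (h : m < 10) :
    convertPos m = (if m = 3 then 7 else if m = 7 then 3 else (m : Int)) := by
  rw [convertPos]; simp [h]

theorem convertPos_ge (m : Nat) (h : 10 ≤ m) :
    convertPos m = convertPos (m / 10) * 10 +
      (if m % 10 = 3 then 7 else if m % 10 = 7 then 3 else ((m % 10 : Nat) : Int)) := by
  rw [convertPos]; simp [Nat.not_lt.mpr h]

theorem foldA_toDigits (m : Nat) : ∀ t : Int,
    (Nat.toDigits 10 m).foldl stepA t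
      = t * 10 ^ (Nat.toDigits 10 m).length + convertPos m := by
  induction m using Nat.strong_induction_on with
  | _ m ih =>
    intro t
    by_cases h : m < 10
    · rw [toDigits_lt m h, convertPos_lt m h]
      simp [stepA_digitChar t m h]
    · have h' : 10 ≤ m := by omega
      have hlt : m / 10 < m := Nat.div_lt_self (by omega) (by omega)
      rw [toDigits_ge m h', convertPos_ge m h']
      rw [List.foldl_append, ih (m / 10) hlt t]
      simp only [List.foldl_cons, List.foldl_nil, List.length_append,
        List.length_singleton]
      rw [stepA_digitChar _ (m % 10) (Nat.mod_lt m (by omega))]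
      ring

theorem convertPos_id (m : Nat)
    (h3 : '3' ∉ Nat.toDigits 10 m) (h7 : '7' ∉ Nat.toDigits 10 m) :
    convertPos m = (m : Int) := by
  induction m using Nat.strong_induction_on with
  | _ m ih =>
    by_cases h : m < 10
    · rw [toDigits_lt m h] at h3 h7
      rw [convertPos_lt m h]
      interval_cases m <;> simp_all [Nat.digitChar]
    · have h' : 10 ≤ m := by omega
      have hlt : m / 10 < m := Nat.div_lt_self (by omega) (by omega)
      rw [toDigits_ge m h'] at h3 h7
      simp only [List.mem_append, List.mem_singleton, not_or] at h3 h7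
      rw [convertPos_ge m h', ih (m / 10) hlt h3.1 h7.1]
      have hr : m % 10 < 10 := Nat.mod_lt m (by omega)
      have hne3 : m % 10 ≠ 3 := by
        intro hc; exact h3.2 (by rw [hc]; rfl)
      have hne7 : m % 10 ≠ 7 := by
        intro hc; exact h7.2 (by rw [hc]; rfl)
      simp only [hne3, hne7, if_false]
      push_cast
      omega

-- toChars of a nonnegative / negative int, in terms of Nat.toDigits
theorem toChars_of_nonneg (n : Int) (h : 0 ≤ n) :
    PySem.Int.toChars n = Nat.toDigits 10 n.toNat := by
  simp [PySem.Int.toChars, Int.not_lt.mpr h]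

theorem toChars_of_neg (n : Int) (h : n < 0) :
    PySem.Int.toChars n = '-' :: Nat.toDigits 10 n.natAbs := by
  simp [PySem.Int.toChars, h]

theorem convert_alt_eq (n : Int) :
    convert_alt n = if n < 0 then -(convertPos n.natAbs) else convertPos n.natAbs := by
  unfold convert_alt
  by_cases h : n < 0
  · simp only [h, if_true]
    congr 1
    congr 1
    omega
  · simp only [h, if_false]
    congr 1
    omega

-- the accumulator loop of A computes convertPos of |n|
theorem total_eq (n : Int) :
    (PySem.Int.toChars |n|).foldl stepA 0 = convertPos n.natAbs := by
  rw [toChars_of_nonneg _ (abs_nonneg n)]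
  have h : |n|.toNat = n.natAbs := by rw [Int.abs_eq_natAbs]; omega
  rw [h, foldA_toDigits n.natAbs 0]
  ring

-- no '3' and no '7' in str(n) → the swap is the identity on n
theorem guard_id (n : Int)
    (h3 : PySem.Chars.isIn ['3'] (PySem.Int.toChars n) = false)
    (h7 : PySem.Chars.isIn ['7'] (PySem.Int.toChars n) = false) :
    convert_alt n = n := by
  rw [PySem.Chars.isIn_eq_false_iff, List.singleton_infix_iff] at h3 h7
  rw [convert_alt_eq]
  by_cases h : n < 0
  · rw [toChars_of_neg n h] at h3 h7
    simp only [List.mem_cons, not_or] at h3 h7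
    rw [if_pos h, convertPos_id n.natAbs h3.2 h7.2]
    omega
  · rw [toChars_of_nonneg n (by omega)] at h3 h7
    have hna : n.toNat = n.natAbs := by omega
    rw [hna] at h3 h7
    rw [if_neg h, convertPos_id n.natAbs h3 h7]
    omega

-- ===== VERDICT (by name: the statement is the Claim_ definition above) =====
theorem convert_spec : Claim_equal_convert := by
  intro n _
  unfold Spec_convert convert
  by_cases hg : ¬ PySem.Chars.isIn ['3'] (PySem.Int.toChars n)
      ∧ ¬ PySem.Chars.isIn ['7'] (PySem.Int.toChars n)
  · rw [if_pos hg]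
    exact (guard_id n (by simpa using hg.1) (by simpa using hg.2)).symm
  · rw [if_neg hg]
    simp only [total_eq n, convert_alt_eq n]
    by_cases h : n < 0 <;> simp [h]
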